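-- pv_equiv track=rewrite | github.com/Daniela-Tech0503/machine-file-converter | api/app/services/ai.py | _summarize_ocr_failure
-- ===== SOURCE A (Python) =====
-- def _summarize_ocr_failure(warnings: list[str]) -> str | None:
--     for warning in warnings:
--         if "authentication failed" in warning.lower():
--             return warning
--     for warning in warnings:
--         if warning:
--             return warning
--     return None
-- ===== SOURCE B (Python) =====
-- def _summarize_ocr_failure(warnings: list[str]) -> str | None:
--     fallback = None
--     for warning in warnings:
--         if "authentication failed" in warning.lower():
--             return warning
--         if fallback is None and warning:
--             fallback = warning
--     return fallback
-- ===== Notes on version B (the rewrite author's own statement) =====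
-- stated objective: alternative
-- what changed: A's two sequential scans (first for an auth-failed warning, then for any non-empty warning) are merged into one scan that stashes the first non-empty warning as a fallback while still giving auth-failed messages priority.
import Mathlib
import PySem

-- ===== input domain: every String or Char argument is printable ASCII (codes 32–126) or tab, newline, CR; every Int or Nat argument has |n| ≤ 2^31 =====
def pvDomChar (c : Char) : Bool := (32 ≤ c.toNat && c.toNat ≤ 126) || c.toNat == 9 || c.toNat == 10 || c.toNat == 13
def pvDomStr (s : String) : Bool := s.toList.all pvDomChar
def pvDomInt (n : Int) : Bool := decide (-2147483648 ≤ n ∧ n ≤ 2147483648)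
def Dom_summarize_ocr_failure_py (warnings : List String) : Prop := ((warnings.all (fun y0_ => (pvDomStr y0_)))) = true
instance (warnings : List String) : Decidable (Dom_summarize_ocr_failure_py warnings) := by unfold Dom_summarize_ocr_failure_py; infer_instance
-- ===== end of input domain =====

-- B merges A's two sequential scans into one pass that keeps a fallback accumulator while giving auth-failed warnings priority (alternative decomposition, same cost).


-- ===== PORT A =====
-- first loop: return the first warning containing "authentication failed" (lower-cased)
def pvALoop1 : List String → Option String
  | [] => none
  | w :: rest =>
    if PySem.Str.isIn "authentication failed" (PySem.Str.lower w) then some w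
    else pvALoop1 rest

-- second loop: return the first truthy (non-empty) warning
def pvALoop2 : List String → Option String
  | [] => none
  | w :: rest => if w == "" then pvALoop2 rest else some w

def summarize_ocr_failure_py (warnings : List String) : Option String :=
  match pvALoop1 warnings with
  | some w => some w
  | none => pvALoop2 warnings

-- ===== PORT B =====
-- single pass: return immediately on an auth-failed warning, otherwise stash the
-- first non-empty warning in `fallback` and return it after the loop
def pvBLoop (fallback : Option String) : List String → Option String
  | [] => fallback
  | w :: rest =>
    if PySem.Str.isIn "authentication failed" (PySem.Str.lower w) then some w
    else pvBLoop (if fallback.isNone && !(w == "") then some w else fallback) rest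

def summarize_ocr_failure_py_alt (warnings : List String) : Option String :=
  pvBLoop none warnings

-- ===== PRECONDITION & SPEC =====
def Spec_summarize_ocr_failure_py (warnings : List String) (out : Option String) : Prop := out = summarize_ocr_failure_py_alt warnings
instance (warnings : List String) (out : Option String) : Decidable (Spec_summarize_ocr_failure_py warnings out) := by unfold Spec_summarize_ocr_failure_py; infer_instance

-- ===== CLAIM (what is proved, stated in full; the proofs are below) =====
def Claim_equal_summarize_ocr_failure_py : Prop := ∀ (warnings : List String), Dom_summarize_ocr_failure_py warnings → Spec_summarize_ocr_failure_py warnings (summarize_ocr_failure_py warnings)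

-- ===== LEMMAS AND PROOFS =====
theorem pvBLoop_eq (ws : List String) : ∀ (fb : Option String),
    pvBLoop fb ws = (pvALoop1 ws).or (fb.or (pvALoop2 ws)) := by
  induction ws with
  | nil => intro fb; cases fb <;> simp [pvBLoop, pvALoop1, pvALoop2]
  | cons w rest ih =>
    intro fb
    simp only [pvBLoop, pvALoop1, pvALoop2, ih]
    split_ifs with h h2 h3 <;> cases fb <;> simp_all

-- ===== VERDICT (by name: the statement is the Claim_ definition above) =====
theorem summarize_ocr_failure_py_spec : Claim_equal_summarize_ocr_failure_py := by
  intro ws _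
  show summarize_ocr_failure_py ws = summarize_ocr_failure_py_alt ws
  simp only [summarize_ocr_failure_py, summarize_ocr_failure_py_alt, pvBLoop_eq, Option.none_or]
  cases pvALoop1 ws <;> simp
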